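-- pv_equiv track=rewrite | github.com/dcharb78/UFRFv3_LEAN4_v1 | scripts/riemann_distance_streaming.py | distinct_points_per_2pi
-- ===== SOURCE A (Python) =====
-- import math
-- from typing import Dict, Iterable, Iterator, List, Sequence, Tuple
--
-- def gcd_many(xs: Sequence[int]) -> int:
--     g = 0
--     for x in xs:
--         g = math.gcd(g, x)
--     return g
--
-- def combinations_indices(n: int, r: int) -> Iterator[Tuple[int, ...]]:
--     idx = list(range(r))
--     if r == 0 or r > n:
--         return
--     while True:
--         yield tuple(idx)
--         i = r - 1
--         while i >= 0 and idx[i] == i + n - r: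
--             i -= 1
--         if i < 0:
--             break
--         idx[i] += 1
--         for j in range(i + 1, r):
--             idx[j] = idx[j - 1] + 1
--
-- def distinct_points_per_2pi(generators: Sequence[int]) -> int:
--     """
--     Exact count of distinct lattice points in one 2π window.
--
--     Inclusion-exclusion on divisibility classes gives:
--       count = Σ (-1)^(k+1) gcd(subset)
--     over all nonempty subsets.
--     """
--     gens = list(generators)
--     total = 0
--     n = len(gens)
--     for r in range(1, n + 1):
--         sign = 1 if (r % 2 == 1) else -1
--         subtotal = 0
--         for idx in combinations_indices(n, r):
--             subset = [gens[i] for i in idx]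
--             subtotal += gcd_many(subset)
--         total += sign * subtotal
--     return total
-- ===== SOURCE B (Python) =====
-- import math
--
-- def distinct_points_per_2pi(generators):
--     # DP over generators: signed counts of subset gcds, one dict pass per generator.
--     counts = {}
--     for x in generators:
--         new = dict(counts)
--         for g, c in counts.items():
--             k = math.gcd(g, x)
--             new[k] = new.get(k, 0) - c
--         ax = abs(x)
--         new[ax] = new.get(ax, 0) + 1
--         counts = new
--     return sum(g * c for g, c in counts.items())
-- ===== Notes on version B (the rewrite author's own statement) =====
-- stated objective: faster
-- what changed: Replaces the exponential inclusion-exclusion (a hand-rolled lexicographic combinations generator per subset size, summing gcds of all 2^n-1 subsets) by a single left-to-right pass that maintains a dict mapping each distinct subset-gcd value to its signed subset count, so the answer is one weighted sum over at most divisor-many keys.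
import Mathlib
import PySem

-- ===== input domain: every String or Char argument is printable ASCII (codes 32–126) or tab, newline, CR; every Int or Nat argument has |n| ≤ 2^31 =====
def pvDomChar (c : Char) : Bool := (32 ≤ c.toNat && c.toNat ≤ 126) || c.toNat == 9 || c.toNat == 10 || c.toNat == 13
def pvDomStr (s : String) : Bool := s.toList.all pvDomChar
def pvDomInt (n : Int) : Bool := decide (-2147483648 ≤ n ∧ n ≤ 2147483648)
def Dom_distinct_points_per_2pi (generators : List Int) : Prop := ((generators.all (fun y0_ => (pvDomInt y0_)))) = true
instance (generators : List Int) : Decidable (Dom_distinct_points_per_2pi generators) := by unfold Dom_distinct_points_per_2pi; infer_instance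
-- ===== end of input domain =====

-- B replaces A's exponential subset enumeration by a one-pass dict DP on signed
-- counts of distinct subset gcds (measurably faster; equal on every input).

-- ===== PORT A =====

-- math.gcd on ints (nonnegative gcd of absolute values)
def pyGcd (a b : Int) : Int := (Int.gcd a b : Int)

-- g = 0; for x in xs: g = math.gcd(g, x)
def gcd_many (xs : List Int) : Int := xs.foldl (fun g x => pyGcd g x) 0

-- inner 'while i >= 0 and idx[i] == i + n - r: i -= 1' (indices are always in
-- range when reached, so the total pyGetD read is exact here)
def findI (idx : List Int) (n r i : Int) : Int :=
  if _h : i < 0 then i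
  else if PySem.List.pyGetD idx i 0 = i + n - r then findI idx n r (i - 1) else i
termination_by (i + 1).toNat
decreasing_by omega

-- 'for j in range(i + 1, r): idx[j] = idx[j - 1] + 1' (indices in range: exact)
def resetTail (idx : List Int) (js : List Int) : List Int :=
  js.foldl (fun a j => PySem.List.pySetD a j (PySem.List.pyGetD a (j - 1) 0 + 1)) idx

-- 'idx[i] += 1' followed by the reset loop
def stepIdx (idx : List Int) (i n r : Int) : List Int :=
  resetTail (PySem.List.pySetD idx i (PySem.List.pyGetD idx i 0 + 1)) (PySem.List.pyRange (i + 1) r 1)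

-- one 'while True' iteration: yield idx; find i; stop or step (fuel bounds the
-- number of yields; 2^n + 1 is enough, proved below)
def combosAux (n r : Int) (idx : List Int) : Nat → List (List Int)
  | 0 => []
  | fuel + 1 =>
    let i := findI idx n r (r - 1)
    if i < 0 then [idx] else idx :: combosAux n r (stepIdx idx i n r) fuel

def combinations_indices (n r : Int) : List (List Int) :=
  let idx := PySem.List.pyRange 0 r 1
  if r = 0 ∨ r > n then [] else combosAux n r idx (2 ^ n.toNat + 1)

def distinct_points_per_2pi (generators : List Int) : Int :=
  let gens := generators
  let n : Int := PySem.List.len gens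
  (PySem.List.pyRange 1 (n + 1) 1).foldl (fun total r =>
    let sign : Int := if PySem.Int.mod r 2 = 1 then 1 else -1
    let subtotal := (combinations_indices n r).foldl
      (fun st idx => st + gcd_many (idx.map (fun i => PySem.List.pyGetD gens i 0))) 0
    total + sign * subtotal) 0

-- ===== PORT B =====

def distinct_points_per_2pi_alt (generators : List Int) : Int :=
  let counts := generators.foldl (fun (counts : PySem.Dict Int Int) x =>
    let nw := counts.items.foldl (fun (acc : PySem.Dict Int Int) p =>
      let k := pyGcd p.1 x
      acc.insert k (acc.getD k 0 - p.2)) counts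
    let ax : Int := |x|
    nw.insert ax (nw.getD ax 0 + 1)) PySem.Dict.empty
  counts.items.foldl (fun s p => s + p.1 * p.2) 0

-- ===== PRECONDITION & SPEC =====
def Spec_distinct_points_per_2pi (generators : List Int) (out : Int) : Prop := out = distinct_points_per_2pi_alt generators
instance (generators : List Int) (out : Int) : Decidable (Spec_distinct_points_per_2pi generators out) := by unfold Spec_distinct_points_per_2pi; infer_instance

-- ===== CLAIM (what is proved, stated in full; the proofs are below) =====
def Claim_equal_distinct_points_per_2pi : Prop := ∀ (generators : List Int), Dom_distinct_points_per_2pi generators → Spec_distinct_points_per_2pi generators (distinct_points_per_2pi generators)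

-- ===== LEMMAS AND PROOFS =====

-- ---------- proof-side definitions ----------

-- consecutive run a, a+1, ..., a+k-1
def run (a : Int) : Nat → List Int
  | 0 => []
  | k + 1 => a :: run (a + 1) k

-- strictly increasing, elements in [lo, n)
def Valid (lo n : Int) : List Int → Prop
  | [] => True
  | a :: t => lo ≤ a ∧ a < n ∧ Valid (a + 1) n t

-- all strictly increasing r-element lists over [lo, n), lexicographic order
def aC (lo n : Int) (r : Nat) : List (List Int) :=
  match r with
  | 0 => [[]]
  | r' + 1 =>
    if _h : lo < n then ((aC (lo + 1) n r').map (lo :: ·)) ++ aC (lo + 1) n (r' + 1)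
    else []
termination_by ((n - lo).toNat, r)
decreasing_by
· exact Prod.Lex.left _ _ (by omega)
· exact Prod.Lex.left _ _ (by omega)

-- the tail of the lexicographic enumeration starting at state s
def aCfrom (n : Int) : List Int → List (List Int)
  | [] => [[]]
  | a :: t => ((aCfrom n t).map (a :: ·)) ++ aC (a + 1) n (t.length + 1)

-- the lexicographically maximal state
def Maxi (n : Int) (t : List Int) : Prop := t = run (n - t.length) t.length

-- r-element sublists (as value lists, in aC-compatible order)
def SL : Nat → List Int → List (List Int)
  | 0, _ => [[]]
  | _ + 1, [] => []
  | r + 1, a :: l => ((SL r l).map (a :: ·)) ++ SL (r + 1) l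

def subsStep (acc : List (List Int)) (x : Int) : List (List Int) := acc ++ acc.map (fun S => S ++ [x])
def subs (xs : List Int) : List (List Int) := xs.foldl subsStep [[]]
def sgn (S : List Int) : Int := if S.length % 2 = 1 then 1 else -1
def sigmaSpec (gens : List Int) : Int := ((subs gens).map (fun S => sgn S * gcd_many S)).sum
def nsubs (xs : List Int) : List (List Int) := (subs xs).filter (fun S => !S.isEmpty)
def W (xs : List Int) (d : Int) : Int := ((nsubs xs).map (fun S => if gcd_many S = d then sgn S else 0)).sum

-- ---------- basic facts ----------

theorem pyRange_eq_run (a b : Int) : PySem.List.pyRange a b 1 = run a (b - a).toNat := by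
  rw [PySem.List.pyRange_one]
  generalize (b - a).toNat = k
  induction k generalizing a with
  | zero => rfl
  | succ k ih =>
    rw [List.range_succ_eq_map, run]
    simp only [List.map_cons, List.map_map]
    congr 1
    · simp
    · rw [← ih (a+1)]; congr 1; funext x; simp [Nat.succ_eq_add_one]; ring

theorem length_run (a : Int) (k : Nat) : (run a k).length = k := by
  induction k generalizing a with
  | zero => rfl
  | succ k ih => simp [run, ih]


theorem valid_mono {lo lo' n : Int} {t : List Int} (h : Valid lo n t) (hle : lo' ≤ lo) :
    Valid lo' n t := by
  cases t with
  | nil => trivial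
  | cons a t => exact ⟨le_trans hle h.1, h.2.1, h.2.2⟩

theorem valid_run {lo n a : Int} {k : Nat} (h1 : lo ≤ a) (h2 : a + k ≤ n) :
    Valid lo n (run a k) := by
  induction k generalizing lo a with
  | zero => trivial
  | succ k ih =>
    refine ⟨h1, by push_cast at h2; omega, ih (le_refl _) (by push_cast at h2 ⊢; omega)⟩

theorem aC_nil_aux {n : Int} : ∀ (d : Nat) (lo : Int) (r : Nat), (n - lo).toNat = d → n - lo < (r : Int) + 1 → aC lo n (r + 1) = [] := by
  intro d
  induction d using Nat.strong_induction_on with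
  | _ d ih =>
    intro lo r hd h
    rw [aC]
    split
    · next hlt =>
      have hd' : (n - (lo + 1)).toNat < d := by omega
      cases r with
      | zero => omega
      | succ r' =>
        rw [ih _ hd' (lo + 1) r' rfl (by push_cast at h ⊢; omega),
            ih _ hd' (lo + 1) (r' + 1) rfl (by push_cast at h ⊢; omega)]
        simp
    · rfl

theorem aC_nil_of_small {n lo : Int} {r : Nat} (h : n - lo < (r : Int)) (hr : 0 < r) : aC lo n r = [] := by
  rcases r with _ | r'
  · omega
  · exact aC_nil_aux _ lo r' rfl (by push_cast at h ⊢; omega)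

theorem aCfrom_run {n : Int} : ∀ {k : Nat} {lo : Int}, lo + k ≤ n → aCfrom n (run lo k) = aC lo n k := by
  intro k
  induction k with
  | zero =>
    intro lo h
    rw [show run lo 0 = [] from rfl, aCfrom, aC]
  | succ k ih =>
    intro lo h
    rw [run, aCfrom, length_run, ih (by push_cast at h ⊢; omega)]
    conv_rhs => rw [aC]
    rw [dif_pos (by push_cast at h; omega)]

theorem aCfrom_ne_nil (n : Int) (t : List Int) : aCfrom n t ≠ [] := by
  induction t with
  | nil => simp [aCfrom]
  | cons a t ih => simp [aCfrom, ih]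

theorem aCfrom_maxi {n : Int} : ∀ {t : List Int}, Valid 0 n t → Maxi n t → aCfrom n t = [t] := by
  intro t
  induction t with
  | nil => intro _ _; rfl
  | cons a t ih =>
    intro hv hm
    unfold Maxi at hm
    simp only [List.length_cons] at hm
    rw [run] at hm
    obtain ⟨ha, ht⟩ := List.cons.inj hm
    have hmt : Maxi n t := by
      unfold Maxi
      conv_lhs => rw [ht]
      congr 1
      push_cast
      omega
    rw [aCfrom, ih (valid_mono hv.2.2 (by have := hv.1; omega)) hmt, aC_nil_of_small (by push_cast at ha ⊢; omega) (by omega)]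
    simp [ha]

theorem aC_len (n : Int) : ∀ (d : Nat) (lo : Int) (r : Nat), (n - lo).toNat = d → (aC lo n r).length ≤ 2 ^ (n - lo).toNat := by
  intro d
  induction d using Nat.strong_induction_on with
  | _ d ih =>
    intro lo r hd
    rcases r with _ | r'
    · simpa [aC] using Nat.one_le_two_pow
    · rw [aC]
      split
      · next hlt =>
        have hd' : (n - (lo + 1)).toNat < d := by omega
        have h1 := ih _ hd' (lo + 1) r' rfl
        have h2 := ih _ hd' (lo + 1) (r' + 1) rfl
        have hpow : (n - lo).toNat = (n - (lo + 1)).toNat + 1 := by omega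
        rw [List.length_append, List.length_map, hpow, pow_succ]
        omega
      · simp

-- ---------- the generator inner loop ----------

theorem findI_neg (idx : List Int) (n r i : Int) (h : i < 0) : findI idx n r i = i := by
  rw [findI]; simp [h]

theorem findI_step (idx : List Int) (n r i : Int) (h : 0 ≤ i) :
    findI idx n r i =
      if PySem.List.pyGetD idx i 0 = i + n - r then findI idx n r (i - 1) else i := by
  rw [findI]; rw [dif_neg (by omega)]

theorem pyGetD_cons_succ (x : Int) (u : List Int) (i : Int) (h : 0 ≤ i) :
    PySem.List.pyGetD (x :: u) (i + 1) 0 = PySem.List.pyGetD u i 0 := by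
  obtain ⟨m, rfl⟩ : ∃ m : Nat, i = (m : Int) := ⟨i.toNat, by omega⟩
  rw [show ((m : Int) + 1) = ((m + 1 : Nat) : Int) by push_cast; ring]
  rw [PySem.List.pyGetD_natCast, PySem.List.pyGetD_natCast]
  rfl

theorem pySetD_cons_succ (x : Int) (u : List Int) (i : Int) (v : Int) (h : 0 ≤ i) :
    PySem.List.pySetD (x :: u) (i + 1) v = x :: PySem.List.pySetD u i v := by
  obtain ⟨m, rfl⟩ : ∃ m : Nat, i = (m : Int) := ⟨i.toNat, by omega⟩
  rw [show ((m : Int) + 1) = ((m + 1 : Nat) : Int) by push_cast; ring]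
  rw [PySem.List.pySetD_natCast, PySem.List.pySetD_natCast]
  rfl

theorem findI_cons_zero (x : Int) (t : List Int) (n r : Int) :
    findI (x :: t) n r 1 =
      (if findI t n (r - 1) 0 < 0 then (if x = n - r then -1 else 0)
       else findI t n (r - 1) 0 + 1) := by
  have e1 : PySem.List.pyGetD (x :: t) 1 0 = PySem.List.pyGetD t 0 0 := by
    simpa using pyGetD_cons_succ x t 0 (le_refl 0)
  have hR : findI t n (r - 1) 0 =
      if PySem.List.pyGetD t 0 0 = n - r + 1 then (-1 : Int) else 0 := by
    rw [findI_step _ _ _ _ (by omega)]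
    rw [show (0 : Int) + n - (r - 1) = n - r + 1 by ring]
    by_cases hc : PySem.List.pyGetD t 0 0 = n - r + 1
    · rw [if_pos hc, if_pos hc, show (0 : Int) - 1 = -1 by ring, findI_neg _ _ _ _ (by omega)]
    · rw [if_neg hc, if_neg hc]
  rw [findI_step _ _ _ _ (by omega), e1, hR]
  rw [show (1 : Int) + n - r = n - r + 1 by ring]
  by_cases hc : PySem.List.pyGetD t 0 0 = n - r + 1
  · rw [if_pos hc, if_pos (by omega)]
    rw [show (1 : Int) - 1 = 0 by ring, findI_step _ _ _ _ (by omega), PySem.List.pyGetD_zero_cons]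
    by_cases hx : x = n - r
    · rw [if_pos (by omega), show (0 : Int) - 1 = -1 by ring, findI_neg _ _ _ _ (by omega), if_pos hx]
    · rw [if_neg (by omega), if_neg hx]
  · rw [if_neg hc, if_neg (by omega), if_neg hc]
    ring

theorem findI_cons (x : Int) (t : List Int) (n r : Int) (k : Nat) :
    findI (x :: t) n r ((k : Int) + 1) =
      (if findI t n (r - 1) (k : Int) < 0 then (if x = n - r then -1 else 0)
       else findI t n (r - 1) (k : Int) + 1) := by
  induction k with
  | zero => simpa using findI_cons_zero x t n r
  | succ k ih =>
    have hc2 : ((k + 1 : Nat) : Int) = (k : Int) + 1 := by push_cast; ring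
    rw [hc2]
    rw [findI_step _ _ _ _ (by omega)]
    have e1 : PySem.List.pyGetD (x :: t) ((k : Int) + 1 + 1) 0 = PySem.List.pyGetD t ((k : Int) + 1) 0 := by
      exact pyGetD_cons_succ x t ((k : Int) + 1) (by omega)
    rw [e1]
    conv_rhs => rw [findI_step _ _ _ _ (by omega)]
    by_cases hc : PySem.List.pyGetD t ((k : Int) + 1) 0 = (k : Int) + 1 + n - (r - 1)
    · rw [if_pos (by rw [hc]; ring), if_pos hc]
      rw [show (k : Int) + 1 + 1 - 1 = (k : Int) + 1 by ring,
          show (k : Int) + 1 - 1 = (k : Int) by ring]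
      exact ih
    · rw [if_neg (fun hh => hc (by rw [hh]; ring)), if_neg hc]
      rw [if_neg (by omega)]

theorem findI_singleton (a n r : Int) : findI [a] n r 0 = if a = n - r then -1 else 0 := by
  rw [findI_step _ _ _ _ (by omega), PySem.List.pyGetD_zero_cons]
  by_cases hx : a = n - r
  · rw [if_pos (by omega), show (0:Int) - 1 = -1 by ring, findI_neg _ _ _ _ (by omega), if_pos hx]
  · rw [if_neg (by omega), if_neg hx]

theorem range_shift (a b : Int) :
    (PySem.List.pyRange a b 1).map (· - 1) = PySem.List.pyRange (a - 1) (b - 1) 1 := by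
  rw [PySem.List.pyRange_one, PySem.List.pyRange_one, List.map_map]
  rw [show b - a = b - 1 - (a - 1) by ring]
  congr 1
  funext m
  simp
  ring

theorem resetTail_cons (js : List Int) : ∀ (x : Int) (u : List Int), (∀ j ∈ js, 2 ≤ j) →
    resetTail (x :: u) js = x :: resetTail u (js.map (· - 1)) := by
  induction js with
  | nil => intro x u _; rfl
  | cons j js ih =>
    intro x u h
    have hj : 2 ≤ j := h j (by simp)
    show resetTail (PySem.List.pySetD (x :: u) j (PySem.List.pyGetD (x :: u) (j - 1) 0 + 1)) js = _
    rw [show j - 1 = (j - 2) + 1 by ring, pyGetD_cons_succ _ _ _ (by omega),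
        show j = (j - 1) + 1 by ring, pySetD_cons_succ _ _ _ _ (by omega)]
    rw [ih _ _ (fun j hm => h j (by simp [hm]))]
    simp only [List.map_cons]
    rw [show j - 1 + 1 - 2 = j - 1 - 1 from by ring, show j - 1 + 1 - 1 = j - 1 from by ring]
    rfl

theorem resetTail_run : ∀ (u p : List Int) (hp : p ≠ []),
    resetTail (p ++ u) (PySem.List.pyRange (p.length : Int) ((p.length : Int) + u.length) 1) =
      p ++ run (p.getLast hp + 1) u.length := by
  intro u
  induction u with
  | nil =>
    intro p hp
    rw [show ((p.length : Int) + (List.length [] : Int)) = (p.length : Int) by simp,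
        PySem.List.pyRange_one_eq_nil (le_refl _)]
    simp [resetTail, run]
  | cons w u ih =>
    intro p hp
    have hlp : 1 ≤ p.length := List.length_pos_iff.mpr hp
    rw [PySem.List.pyRange_one_cons (by simp)]
    show resetTail (PySem.List.pySetD (p ++ w :: u) (p.length : Int)
        (PySem.List.pyGetD (p ++ w :: u) ((p.length : Int) - 1) 0 + 1)) _ = _
    have hg : PySem.List.pyGetD (p ++ w :: u) ((p.length : Int) - 1) 0 = p.getLast hp := by
      rw [show ((p.length : Int) - 1) = ((p.length - 1 : Nat) : Int) by omega,
          PySem.List.pyGetD_natCast,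
          List.getD_eq_getElem _ _ (by simp; omega),
          List.getElem_append_left (by omega), List.getLast_eq_getElem]
    rw [hg, PySem.List.pySetD_natCast, List.set_append, if_neg (by omega)]
    rw [show p.length - p.length = 0 by omega, List.set_cons_zero]
    set v := p.getLast hp + 1 with hv
    have hrw : p ++ v :: u = (p ++ [v]) ++ u := by simp
    rw [hrw]
    have hrange : PySem.List.pyRange ((p.length : Int) + 1) ((p.length : Int) + ((w :: u).length : Int)) 1 =
        PySem.List.pyRange (((p ++ [v]).length : Int)) (((p ++ [v]).length : Int) + (u.length : Int)) 1 := by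
      congr 1 <;> simp <;> push_cast <;> ring
    rw [hrange, ih (p ++ [v]) (by simp)]
    have hgl : (p ++ [v]).getLast (by simp) = v := List.getLast_concat
    rw [hgl]
    simp only [List.append_assoc, List.cons_append, List.nil_append, List.length_cons]
    rw [run]

theorem step_cons (x : Int) (t : List Int) (n r : Int) (k : Nat) :
    stepIdx (x :: t) ((k : Int) + 1) n r = x :: stepIdx t (k : Int) n (r - 1) := by
  unfold stepIdx
  rw [pyGetD_cons_succ _ _ _ (by omega), pySetD_cons_succ _ _ _ _ (by omega)]
  rw [resetTail_cons _ _ _ (fun j hj => by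
    have := PySem.List.mem_pyRange_one.mp hj
    omega)]
  rw [range_shift]
  congr 2 <;> ring

theorem step_head (x : Int) (t : List Int) (n : Int) :
    stepIdx (x :: t) 0 n ((t.length : Int) + 1) = run (x + 1) (t.length + 1) := by
  unfold stepIdx
  rw [PySem.List.pyGetD_zero_cons]
  rw [show PySem.List.pySetD (x :: t) 0 (x + 1) = (x + 1) :: t from by
    simpa using PySem.List.pySetD_natCast (x :: t) 0 (x + 1)]
  have h := resetTail_run t [x + 1] (by simp)
  simp only [List.length_cons, List.length_nil] at h ⊢
  rw [show (0 : Int) + 1 = ((1 : Nat) : Int) by norm_num]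
  rw [show ((t.length : Int) + 1) = ((1 : Nat) : Int) + (t.length : Int) by push_cast; ring]
  rw [show ([x + 1] ++ t : List Int) = (x + 1) :: t from by simp] at h
  rw [h]
  rw [show ([x + 1] : List Int).getLast (by simp) = x + 1 from rfl]
  rw [run]
  simp

-- ---------- successor lemma and generator characterization ----------

theorem maxi_cons {n a : Int} {t : List Int} :
    Maxi n (a :: t) ↔ a = n - ((t.length : Int) + 1) ∧ Maxi n t := by
  unfold Maxi
  simp only [List.length_cons]
  rw [show ((t.length + 1 : Nat) : Int) = (t.length : Int) + 1 from by push_cast; ring]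
  rw [run, show n - ((t.length : Int) + 1) + 1 = n - (t.length : Int) from by ring]
  constructor
  · intro h
    exact ⟨(List.cons.inj h).1, (List.cons.inj h).2⟩
  · intro ⟨h1, h2⟩
    rw [← h1, ← h2]

theorem findI_neg_of_maxi {n : Int} : ∀ {t : List Int}, Maxi n t →
    findI t n (t.length : Int) ((t.length : Int) - 1) < 0 := by
  intro t
  induction t with
  | nil => intro _; rw [findI_neg _ _ _ _ (by simp)]; simp
  | cons a t ih =>
    intro hm
    obtain ⟨ha, hmt⟩ := maxi_cons.mp hm
    rcases t with _ | ⟨b, t'⟩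
    · rw [show ((List.length [a] : Int)) = 1 from by simp, show (1 : Int) - 1 = 0 from by ring,
          findI_singleton]
      rw [if_pos (by simpa using ha)]
      omega
    · have e1 : ((List.length (a :: b :: t') : Nat) : Int) - 1 = ((t'.length : Nat) : Int) + 1 := by
        simp only [List.length_cons]; push_cast; ring
      rw [e1, findI_cons]
      have e2 : ((List.length (a :: b :: t') : Nat) : Int) - 1 = (((b :: t').length : Nat) : Int) := by
        simp
      have e3 : ((t'.length : Nat) : Int) = (((b :: t').length : Nat) : Int) - 1 := by
        simp
      rw [e2, e3, if_pos (ih hmt)]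
      rw [if_pos (by rw [ha]; simp only [List.length_cons]; push_cast; ring)]
      omega

theorem succ_lemma (n : Int) :
    ∀ (t : List Int) (lo : Int), 0 ≤ lo → Valid lo n t → t ≠ [] → ¬ Maxi n t →
      0 ≤ findI t n (t.length : Int) ((t.length : Int) - 1) ∧
      (Valid lo n (stepIdx t (findI t n (t.length : Int) ((t.length : Int) - 1)) n (t.length : Int)) ∧
       (stepIdx t (findI t n (t.length : Int) ((t.length : Int) - 1)) n (t.length : Int)).length = t.length ∧
       aCfrom n t = t :: aCfrom n (stepIdx t (findI t n (t.length : Int) ((t.length : Int) - 1)) n (t.length : Int))) := by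
  intro t
  induction t with
  | nil => intro lo _ _ h _; exact absurd rfl h
  | cons a t' ih =>
    intro lo hlo hv _ hnm
    obtain ⟨ha0, han, hvt⟩ := hv
    have hR : (((a :: t').length : Nat) : Int) = (t'.length : Int) + 1 := by simp
    rcases eq_or_ne t' [] with rfl | ht'ne
    · -- t = [a]
      have hne : a ≠ n - 1 := by
        intro h
        exact hnm (by unfold Maxi; simp [run, h])
      have hstep : stepIdx [a] 0 n (((List.length [a] : Nat) : Int)) = run (a + 1) 1 := by
        have := step_head a [] n
        simpa using this
      have hfind : findI [a] n (((List.length [a] : Nat) : Int)) ((((List.length [a] : Nat) : Int)) - 1) = 0 := by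
        rw [show (((List.length [a] : Nat) : Int)) = 1 from by simp, show (1 : Int) - 1 = 0 from by ring,
            findI_singleton, if_neg (by omega)]
      rw [hfind, hstep]
      refine ⟨le_refl 0, valid_run (by omega) (by push_cast; omega), by simp [length_run], ?_⟩
      show aCfrom n (a :: []) = _
      rw [aCfrom, aCfrom_run (by push_cast; omega)]
      simp [aCfrom]
    · have hlt : 1 ≤ t'.length := List.length_pos_iff.mpr ht'ne
      have hk : ((t'.length : Nat) : Int) = ((t'.length - 1 : Nat) : Int) + 1 := by push_cast; omega
      have hidx : (((a :: t').length : Nat) : Int) - 1 = ((t'.length - 1 : Nat) : Int) + 1 := by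
        rw [hR]; omega
      have hr1 : (((a :: t').length : Nat) : Int) - 1 = ((t'.length : Nat) : Int) := by rw [hR]; ring
      by_cases hmt : Maxi n t'
      · -- tail is maximal, head can advance
        have hane : a ≠ n - (((a :: t').length : Nat) : Int) := by
          intro h
          exact hnm (maxi_cons.mpr ⟨by rw [h, hR], hmt⟩)
        have hfind : findI (a :: t') n (((a :: t').length : Nat) : Int) ((((a :: t').length : Nat) : Int) - 1) = 0 := by
          rw [hidx, findI_cons, hr1, show ((t'.length - 1 : Nat) : Int) = ((t'.length : Nat) : Int) - 1 from by omega, if_pos (findI_neg_of_maxi hmt), if_neg hane]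
        have hbound : a + 1 + ((t'.length : Int) + 1) ≤ n := by
          rcases t' with _ | ⟨c, rest⟩
          · simp at hlt
          · obtain ⟨hc, _⟩ := maxi_cons.mp hmt
            have h1 : a + 1 ≤ c := hvt.1
            have hlen2 : (((a :: c :: rest).length : Nat) : Int) = ((rest.length : Int) + 1) + 1 := by
              simp
            have h2 : a ≠ n - (((rest.length : Int) + 1) + 1) := fun h => hane (by rw [hlen2]; exact h)
            rw [hc] at h1
            simp only [List.length_cons] at h1 ⊢
            push_cast at h1 ⊢
            omega
        have hstep : stepIdx (a :: t') 0 n (((a :: t').length : Nat) : Int) = run (a + 1) (t'.length + 1) := by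
          have := step_head a t' n
          rw [hR]
          simpa using this
        rw [hfind, hstep]
        refine ⟨le_refl 0, valid_run (by omega) (by push_cast at hbound ⊢; omega), by simp [length_run], ?_⟩
        show aCfrom n (a :: t') = _
        rw [aCfrom, aCfrom_run (by push_cast at hbound ⊢; omega),
            aCfrom_maxi (valid_mono hvt (by omega)) hmt]
        simp
      · -- recurse into the tail
        obtain ⟨hi0, hv', hlen', hafrom'⟩ := ih (a + 1) (by omega) hvt ht'ne hmt
        set i' := findI t' n ((t'.length : Nat) : Int) (((t'.length : Nat) : Int) - 1) with hi'
        have hfind : findI (a :: t') n (((a :: t').length : Nat) : Int) ((((a :: t').length : Nat) : Int) - 1) = i' + 1 := by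
          rw [hidx, findI_cons, hr1, show ((t'.length - 1 : Nat) : Int) = ((t'.length : Nat) : Int) - 1 from by omega, ← hi', if_neg (by omega)]
        have hstep : stepIdx (a :: t') (i' + 1) n (((a :: t').length : Nat) : Int) =
            a :: stepIdx t' i' n ((t'.length : Nat) : Int) := by
          obtain ⟨m, hm⟩ : ∃ m : Nat, i' = (m : Int) := ⟨i'.toNat, by omega⟩
          rw [hm, step_cons, hr1]
        rw [hfind, hstep]
        refine ⟨by omega, ⟨ha0, han, hv'⟩, by simp [hlen'], ?_⟩
        show aCfrom n (a :: t') = _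
        rw [aCfrom, hafrom']
        simp only [List.map_cons, List.cons_append]
        rw [aCfrom, hlen']
theorem combosAux_eq (n : Int) :
    ∀ (fuel : Nat) (t : List Int), Valid 0 n t → t ≠ [] →
      (aCfrom n t).length ≤ fuel →
      combosAux n (t.length : Int) t fuel = aCfrom n t := by
  intro fuel
  induction fuel with
  | zero =>
    intro t _ _ hle
    have h0 : (aCfrom n t).length ≠ 0 := by
      simpa [List.length_eq_zero_iff] using aCfrom_ne_nil n t
    omega
  | succ fuel ih =>
    intro t hv htne hle
    rw [combosAux]
    by_cases hm : Maxi n t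
    · rw [if_pos (findI_neg_of_maxi hm), aCfrom_maxi hv hm]
    · obtain ⟨hi0, hv', hlen', haf⟩ := succ_lemma n t 0 (le_refl 0) hv htne hm
      rw [if_neg (by omega), haf]
      congr 1
      have hne' : stepIdx t (findI t n (t.length : Int) ((t.length : Int) - 1)) n (t.length : Int) ≠ [] := by
        intro h
        rw [h] at hlen'
        exact htne (List.length_eq_zero_iff.mp hlen'.symm)
      have hle' : (aCfrom n (stepIdx t (findI t n (t.length : Int) ((t.length : Int) - 1)) n (t.length : Int))).length ≤ fuel := by
        rw [haf] at hle
        simp only [List.length_cons] at hle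
        omega
      have h := ih _ hv' hne' hle'
      rw [hlen'] at h
      exact h

theorem combos_eq_aC (n r : Int) (h1 : 1 ≤ r) (h2 : r ≤ n) :
    combinations_indices n r = aC 0 n r.toNat := by
  unfold combinations_indices
  rw [if_neg (by push_neg; exact ⟨by omega, by omega⟩)]
  rw [show PySem.List.pyRange 0 r 1 = run 0 r.toNat from by rw [pyRange_eq_run]; congr 1; omega]
  have hv : Valid 0 n (run 0 r.toNat) := valid_run (le_refl 0) (by omega)
  have hne : run 0 r.toNat ≠ [] := by
    intro h
    have hl := length_run 0 r.toNat
    rw [h] at hl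
    simp at hl
    omega
  have hlen : (((run 0 r.toNat).length : Nat) : Int) = r := by rw [length_run]; omega
  have hfu : (aCfrom n (run 0 r.toNat)).length ≤ 2 ^ n.toNat + 1 := by
    rw [aCfrom_run (by omega : (0 : Int) + r.toNat ≤ n)]
    have hb := aC_len n (n - 0).toNat 0 r.toNat rfl
    have he : (n - 0).toNat = n.toNat := by omega
    rw [he] at hb
    omega
  have h := combosAux_eq n (2 ^ n.toNat + 1) (run 0 r.toNat) hv hne hfu
  rw [hlen] at h
  rw [h, aCfrom_run (by omega)]

-- ---------- mapping index lists to element lists ----------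

theorem SL_nil_of_gt : ∀ (l : List Int) (r : Nat), l.length < r → SL r l = [] := by
  intro l
  induction l with
  | nil =>
    intro r h
    match r, h with
    | r + 1, _ => rfl
  | cons a l ih =>
    intro r h
    match r, h with
    | r + 1, h =>
      show ((SL r l).map (a :: ·)) ++ SL (r + 1) l = []
      simp only [List.length_cons] at h
      rw [ih r (by omega), ih (r + 1) (by omega)]
      rfl

theorem SL_length : ∀ (l : List Int) (r : Nat) (S : List Int), S ∈ SL r l → S.length = r := by
  intro l
  induction l with
  | nil =>
    intro r S h
    match r, h with
    | 0, h => simp [SL] at h; simp [h]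
  | cons a l ih =>
    intro r S h
    match r, h with
    | 0, h => simp [SL] at h; simp [h]
    | r + 1, h =>
      rw [show SL (r + 1) (a :: l) = ((SL r l).map (a :: ·)) ++ SL (r + 1) l from rfl] at h
      rw [List.mem_append] at h
      rcases h with h | h
      · obtain ⟨S', hS', rfl⟩ := List.mem_map.mp h
        simp [ih r S' hS']
      · exact ih (r + 1) S h

theorem mapsel (gens : List Int) :
    ∀ (d r : Nat) (lo : Nat), gens.length - lo = d →
      (aC (lo : Int) (gens.length : Int) r).map
          (fun idx => idx.map (fun i => PySem.List.pyGetD gens i 0)) =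
        SL r (gens.drop lo) := by
  intro d
  induction d using Nat.strong_induction_on with
  | _ d ih =>
    intro r lo hd
    rcases r with _ | r
    · rw [show aC (lo : Int) (gens.length : Int) 0 = [[]] from by rw [aC], SL]
      rfl
    · by_cases hlo : lo < gens.length
      · rw [aC, dif_pos (by exact_mod_cast hlo)]

        rw [List.drop_eq_getElem_cons hlo, show SL (r + 1) (gens[lo] :: gens.drop (lo + 1)) =
            ((SL r (gens.drop (lo + 1))).map (gens[lo] :: ·)) ++ SL (r + 1) (gens.drop (lo + 1)) from rfl]
        have hcast : (lo : Int) + 1 = ((lo + 1 : Nat) : Int) := by push_cast; ring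
        have h1 := ih (gens.length - (lo + 1)) (by omega) r (lo + 1) rfl
        have h2 := ih (gens.length - (lo + 1)) (by omega) (r + 1) (lo + 1) rfl
        rw [List.map_append, List.map_map, hcast, h2]
        congr 1
        rw [← h1, List.map_map]
        apply List.map_congr_left
        intro idx _
        show (((lo : Nat) : Int) :: idx).map (fun i => PySem.List.pyGetD gens i 0) = _
        simp only [List.map_cons]
        rw [PySem.List.pyGetD_natCast, List.getD_eq_getElem _ _ hlo]
        rfl
      · rw [aC, dif_neg (by exact_mod_cast hlo), List.drop_eq_nil_of_le (by omega)]
        rfl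

-- ---------- sums over sublists ----------

theorem subs_append (l : List Int) (x : Int) :
    subs (l ++ [x]) = subs l ++ (subs l).map (fun S => S ++ [x]) := by
  unfold subs
  rw [List.foldl_append]
  rfl

theorem SL_zero : ∀ (l : List Int), SL 0 l = [[]] := by
  intro l
  cases l <;> rfl

theorem SL_cons (a : Int) (l : List Int) (r : Nat) :
    SL (r + 1) (a :: l) = ((SL r l).map (a :: ·)) ++ SL (r + 1) l := rfl

theorem SL_append_perm (x : Int) :
    ∀ (l : List Int) (r : Nat),
      (SL (r + 1) (l ++ [x])).Perm (SL (r + 1) l ++ (SL r l).map (fun S => S ++ [x])) := by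
  intro l
  induction l with
  | nil =>
    intro r
    rcases r with _ | r'
    · simp [SL]
    · show (((SL (r' + 1) []).map (x :: ·)) ++ SL (r' + 2) []).Perm _
      rw [show SL (r' + 1) ([] : List Int) = [] from rfl,
          show SL (r' + 2) ([] : List Int) = [] from rfl]
      simp [SL]
  | cons a l ih =>
    intro r
    rcases r with _ | r'
    · show (((SL 0 (l ++ [x])).map (a :: ·)) ++ SL 1 (l ++ [x])).Perm _
      rw [SL_zero]
      refine ((ih 0).append_left [[a]]).trans ?_
      rw [SL_zero, SL_zero, SL_cons, SL_zero]
      simp [SL]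
    · rw [show (a :: l) ++ [x] = a :: (l ++ [x]) from rfl, SL_cons, SL_cons, SL_cons]
      have h1 : ((SL (r' + 1) (l ++ [x])).map (a :: ·)).Perm
          ((SL (r' + 1) l).map (a :: ·) ++ ((SL r' l).map (fun S => S ++ [x])).map (a :: ·)) := by
        have h := (ih r').map (a :: ·)
        rwa [List.map_append] at h
      refine (h1.append (ih (r' + 1))).trans ?_
      rw [List.map_append]
      rw [show ((SL r' l).map (a :: ·)).map (fun S => S ++ [x]) =
          ((SL r' l).map (fun S => S ++ [x])).map (a :: ·) from by
        rw [List.map_map, List.map_map]; rfl]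
      rw [List.append_assoc, List.append_assoc]
      exact (List.perm_append_comm_assoc _ _ _).append_left _

theorem sum_range_shift (h : Nat → Int) (m : Nat) :
    ((List.range (m + 1)).map h).sum = h 0 + ((List.range m).map (fun r => h (r + 1))).sum := by
  rw [List.range_succ_eq_map, List.map_cons, List.sum_cons, List.map_map]
  rfl

theorem part0 : ∀ (l : List Int) (F : List Int → Int),
      ((List.range (l.length + 1)).map (fun r => ((SL r l).map F).sum)).sum =
        ((subs l).map F).sum := by
  intro l
  induction l using List.reverseRecOn with
  | nil =>
    intro F
    show ((List.range 1).map _).sum = _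
    rw [show List.range 1 = [0] from rfl]
    simp [SL, subs, subsStep]
  | append_singleton l x ih =>
    intro F
    have hlen : (l ++ [x]).length = l.length + 1 := by simp
    rw [hlen, sum_range_shift]
    have h0 : ((SL 0 (l ++ [x])).map F).sum = F [] := by simp [SL]
    have hpt : ∀ r : Nat, ((SL (r + 1) (l ++ [x])).map F).sum =
        ((SL (r + 1) l).map F).sum + ((SL r l).map (fun S => F (S ++ [x]))).sum := by
      intro r
      have hp := ((SL_append_perm x l r).map F).sum_eq
      rw [hp, List.map_append, List.sum_append, List.map_map]
      rfl
    rw [h0]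
    have hsplit : ((List.range (l.length + 1)).map
          (fun r => ((SL (r + 1) (l ++ [x])).map F).sum)).sum
        = ((List.range (l.length + 1)).map (fun r => ((SL (r + 1) l).map F).sum)).sum
          + ((List.range (l.length + 1)).map (fun r => ((SL r l).map (fun S => F (S ++ [x]))).sum)).sum := by
      rw [show (fun r => ((SL (r + 1) (l ++ [x])).map F).sum)
          = (fun r => ((SL (r + 1) l).map F).sum + ((SL r l).map (fun S => F (S ++ [x]))).sum)
          from funext hpt]
      exact PySem.List.sum_map_add_int _ _ _
    rw [hsplit, ih]
    have hshift := sum_range_shift (fun r => ((SL r l).map F).sum) (l.length + 1)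
    have htop : ((SL (l.length + 1) l).map F).sum = 0 := by
      rw [SL_nil_of_gt l _ (by omega)]
      rfl
    have hfull : ((List.range (l.length + 1 + 1)).map (fun r => ((SL r l).map F).sum)).sum
        = ((subs l).map F).sum := by
      rw [List.range_succ, List.map_append, List.sum_append]
      simp only [List.map_cons, List.map_nil, List.sum_cons, List.sum_nil]
      rw [htop, ih F]
      ring
    have h00 : ((SL 0 l).map F).sum = F [] := by simp [SL]
    rw [hfull, h00] at hshift
    have hA : ((List.range (l.length + 1)).map (fun r => ((SL (r + 1) l).map F).sum)).sum
        = ((subs l).map F).sum - F [] := by omega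
    rw [hA, subs_append, List.map_append, List.sum_append, List.map_map]
    have hcomp : (subs l).map (F ∘ fun S => S ++ [x]) = (subs l).map (fun S => F (S ++ [x])) := rfl
    rw [hcomp]
    ring

theorem A_eq_sigma (gens : List Int) : distinct_points_per_2pi gens = sigmaSpec gens := by
  unfold distinct_points_per_2pi
  dsimp only
  rw [PySem.List.len_eq]
  rw [PySem.List.foldl_add, zero_add, PySem.List.pyRange_one,
      show ((gens.length : Int) + 1 - 1).toNat = gens.length from by omega, List.map_map]
  rw [show sigmaSpec gens = ((List.range (gens.length + 1)).map
        (fun r => ((SL r gens).map (fun S => sgn S * gcd_many S)).sum)).sum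
      from (part0 gens _).symm]
  rw [sum_range_shift]
  rw [show ((SL 0 gens).map (fun S => sgn S * gcd_many S)).sum = 0 from by
    rw [SL_zero]
    simp [sgn, gcd_many]]
  rw [zero_add]
  congr 1
  apply List.map_congr_left
  intro k hk
  have hk' : k < gens.length := List.mem_range.mp hk
  show (if PySem.Int.mod (1 + (k : Int)) 2 = 1 then (1 : Int) else -1) *
      ((combinations_indices (gens.length : Int) (1 + (k : Int))).foldl
        (fun st idx => st + gcd_many (idx.map (fun i => PySem.List.pyGetD gens i 0))) 0)
      = ((SL (k + 1) gens).map (fun S => sgn S * gcd_many S)).sum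
  rw [combos_eq_aC _ _ (by omega) (by omega), PySem.List.foldl_add, zero_add]
  rw [show (1 + (k : Int)).toNat = k + 1 from by omega]
  have hmap := mapsel gens gens.length (k + 1) 0 (by omega)
  rw [show ((0 : Nat) : Int) = (0 : Int) from by norm_num, List.drop_zero] at hmap
  rw [show (aC 0 ((gens.length : Nat) : Int) (k + 1)).map
        (fun idx => gcd_many (idx.map (fun i => PySem.List.pyGetD gens i 0)))
      = ((aC 0 ((gens.length : Nat) : Int) (k + 1)).map
        (fun idx => idx.map (fun i => PySem.List.pyGetD gens i 0))).map gcd_many from by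
    rw [List.map_map]
    rfl]
  rw [hmap]
  have hsgn : (if PySem.Int.mod (1 + (k : Int)) 2 = 1 then (1 : Int) else -1)
      = if (k + 1) % 2 = 1 then (1 : Int) else -1 := by
    rw [show (1 + (k : Int)) = ((k + 1 : Nat) : Int) from by push_cast; ring,
        show (2 : Int) = ((2 : Nat) : Int) from by norm_num,
        PySem.Int.mod_natCast]
    by_cases h : (k + 1) % 2 = 1
    · rw [if_pos (by exact_mod_cast h), if_pos h]
    · rw [if_neg (by exact_mod_cast h), if_neg h]
  rw [hsgn, ← List.sum_map_mul_left]
  apply congrArg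
  apply List.map_congr_left
  intro S hS
  rw [show sgn S = if (k + 1) % 2 = 1 then (1 : Int) else -1 from by
    unfold sgn
    rw [SL_length gens (k + 1) S hS]]

-- ---------- B side ----------

theorem subs_struct_aux : ∀ (l : List Int), ∃ L, subs l = [] :: L ∧ [] ∉ L := by
  intro l
  induction l using List.reverseRecOn with
  | nil => exact ⟨[], rfl, by simp⟩
  | append_singleton l x ih =>
    obtain ⟨L, hL, hni⟩ := ih
    refine ⟨L ++ (subs l).map (fun S => S ++ [x]), ?_, ?_⟩
    · rw [subs_append, hL]
      rfl
    · intro h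
      rcases List.mem_append.mp h with h | h
      · exact hni h
      · obtain ⟨S, _, hS⟩ := List.mem_map.mp h
        exact absurd hS (by simp)

theorem subs_head_struct : ∀ (l : List Int), subs l = [] :: nsubs l ∧ [] ∉ nsubs l := by
  intro l
  obtain ⟨L, hL, hni⟩ := subs_struct_aux l
  have hflt : nsubs l = L := by
    unfold nsubs
    rw [hL, List.filter_cons]
    simp only [List.isEmpty_nil, Bool.not_true, if_false]
    exact List.filter_eq_self.mpr (fun S hS => by
      have hne : S ≠ [] := fun e => hni (e ▸ hS)
      simp [hne])
  rw [hflt]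
  exact ⟨hL, hni⟩

theorem gcdM_append (S : List Int) (x : Int) :
    gcd_many (S ++ [x]) = pyGcd (gcd_many S) x := by
  unfold gcd_many
  rw [List.foldl_append]
  rfl

theorem sgn_append (S : List Int) (x : Int) : sgn (S ++ [x]) = - sgn S := by
  unfold sgn
  rw [List.length_append]
  simp only [List.length_singleton]
  split_ifs with h1 h2 <;> omega

theorem dget_fold (x : Int) :
    ∀ (items : List (Int × Int)) (acc : PySem.Dict Int Int) (d : Int),
      ((items.foldl (fun (acc : PySem.Dict Int Int) p =>
          acc.insert (pyGcd p.1 x) (acc.getD (pyGcd p.1 x) 0 - p.2)) acc).getD d 0) =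
        acc.getD d 0 - (items.map (fun p => if pyGcd p.1 x = d then p.2 else 0)).sum := by
  intro items
  induction items with
  | nil => intro acc d; simp
  | cons p items ih =>
    intro acc d
    rw [List.foldl_cons, ih, List.map_cons, List.sum_cons]
    rw [PySem.Dict.getD_insert]
    by_cases hd : d = pyGcd p.1 x
    · subst hd
      rw [if_pos rfl, if_pos rfl]
      ring
    · rw [if_neg hd, if_neg (fun h => hd h.symm)]
      ring

theorem sum_zero (v : Int) :
    ∀ (ks : List Int) (c : Int), c ∉ ks →
      ((ks.map (fun g => if c = g then v else 0)).sum = 0) := by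
  intro ks
  induction ks with
  | nil => intro c _; rfl
  | cons k ks ih =>
    intro c hc
    rw [List.map_cons, List.sum_cons, if_neg (by simp at hc; exact hc.1), ih c (by simp at hc; exact hc.2)]
    ring

theorem sum_single (v : Int) :
    ∀ (ks : List Int) (c : Int), ks.Nodup → c ∈ ks →
      ((ks.map (fun g => if c = g then v else 0)).sum = v) := by
  intro ks
  induction ks with
  | nil => intro c _ h; simp at h
  | cons k ks ih =>
    intro c hnd hc
    rw [List.map_cons, List.sum_cons]
    rcases List.mem_cons.mp hc with rfl | hc'
    · rw [if_pos rfl, sum_zero _ _ _ (by exact (List.nodup_cons.mp hnd).1)]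
      ring
    · rw [if_neg (fun h => absurd (show k ∈ ks from by rw [← h]; exact hc') (List.nodup_cons.mp hnd).1), ih c (List.nodup_cons.mp hnd).2 hc']
      ring

theorem group_sum (key : List Int → Int) (G : List Int → Int) :
    ∀ (L : List (List Int)) (ks : List Int), ks.Nodup → (∀ b ∈ L, key b ∈ ks) →
      ((ks.map (fun g => (L.map (fun b => if key b = g then G b else 0)).sum)).sum =
        (L.map G).sum) := by
  intro L
  induction L with
  | nil =>
    intro ks _ _
    simp
  | cons b L ih =>
    intro ks hnd hmem
    rw [show (fun g => (((b :: L).map (fun b => if key b = g then G b else 0)).sum))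
        = (fun g => (if key b = g then G b else 0) + ((L.map (fun b => if key b = g then G b else 0)).sum))
        from funext (fun g => by rw [List.map_cons, List.sum_cons])]
    rw [PySem.List.sum_map_add_int, sum_single _ _ _ hnd (hmem b (by simp)),
        ih ks hnd (fun b' hb' => hmem b' (by simp [hb'])), List.map_cons, List.sum_cons]

theorem habs (x : Int) : pyGcd 0 x = |x| := by
  unfold pyGcd
  rw [Int.abs_eq_natAbs]
  norm_num [Int.gcd]

theorem gcdM_single (x : Int) : gcd_many [x] = |x| := by
  rw [show ([x] : List Int) = [] ++ [x] from rfl, gcdM_append]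
  exact habs x

theorem sgn_single (x : Int) : sgn [x] = 1 := by
  norm_num [sgn]

theorem nsubs_append (l : List Int) (x : Int) :
    nsubs (l ++ [x]) = nsubs l ++ ([x] :: (nsubs l).map (fun S => S ++ [x])) := by
  show (subs (l ++ [x])).filter _ = _
  rw [subs_append, List.filter_append]
  congr 1
  rw [List.filter_eq_self.mpr (fun S hS => by
    obtain ⟨T, _, rfl⟩ := List.mem_map.mp hS
    simp)]
  conv_lhs => rw [(subs_head_struct l).1]
  rw [List.map_cons]
  rfl

theorem sum_if_neg (L : List (List Int)) (c : List Int → Prop) [DecidablePred c] (f : List Int → Int) :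
    (L.map (fun b => if c b then - f b else 0)).sum = - (L.map (fun b => if c b then f b else 0)).sum := by
  rw [show (fun b => if c b then - f b else 0) = (fun b => (-1) * (if c b then f b else 0)) from
    funext (fun b => by by_cases h : c b <;> simp [h])]
  rw [List.sum_map_mul_left]
  ring

theorem if_distrib_sum (c : Prop) [Decidable c] (L : List (List Int)) (f : List Int → Int) :
    (if c then (L.map f).sum else 0) = (L.map (fun b => if c then f b else 0)).sum := by
  by_cases h : c
  · simp [h]
  · simp [h]

def DInv (px : List Int) (counts : PySem.Dict Int Int) : Prop :=
  (∀ d, counts.getD d 0 = W px d) ∧ counts.keys.Nodup ∧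
    (∀ S ∈ nsubs px, gcd_many S ∈ counts.keys)

theorem dinv_step (px : List Int) (x : Int) (counts : PySem.Dict Int Int) (h : DInv px counts) :
    DInv (px ++ [x])
      (let nw := counts.items.foldl (fun (acc : PySem.Dict Int Int) p =>
          acc.insert (pyGcd p.1 x) (acc.getD (pyGcd p.1 x) 0 - p.2)) counts
       nw.insert (|x|) (nw.getD (|x|) 0 + 1)) := by
  obtain ⟨hW, hnd, hkeys⟩ := h
  have hitems : ∀ e : Int, (counts.items.map (fun p => if pyGcd p.1 x = e then p.2 else 0)).sum
      = ((nsubs px).map (fun S => if pyGcd (gcd_many S) x = e then sgn S else 0)).sum := by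
    intro e
    rw [PySem.Dict.items_eq_map_keys counts hnd 0, List.map_map]
    have hpt : ((fun p : Int × Int => if pyGcd p.1 x = e then p.2 else 0) ∘ fun k => (k, counts.getD k 0))
        = fun k => ((nsubs px).map (fun S =>
            if gcd_many S = k then (if pyGcd (gcd_many S) x = e then sgn S else 0) else 0)).sum := by
      funext k
      show (if pyGcd k x = e then counts.getD k 0 else 0) = _
      rw [hW k]
      unfold W
      rw [if_distrib_sum]
      congr 1
      apply List.map_congr_left
      intro S _
      by_cases hg : gcd_many S = k
      · subst hg
        simp
      · simp [hg]
    rw [hpt]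
    exact group_sum gcd_many _ (nsubs px) counts.keys hnd hkeys
  have hWx : ∀ d : Int, W (px ++ [x]) d = W px d + (if |x| = d then 1 else 0)
      - ((nsubs px).map (fun S => if pyGcd (gcd_many S) x = d then sgn S else 0)).sum := by
    intro d
    unfold W
    rw [nsubs_append, List.map_append, List.sum_append, List.map_cons, List.sum_cons, List.map_map]
    rw [gcdM_single, sgn_single]
    rw [show ((fun S => if gcd_many S = d then sgn S else 0) ∘ fun S => S ++ [x])
        = (fun S => if pyGcd (gcd_many S) x = d then - sgn S else 0) from funext (fun S => by
      show (if gcd_many (S ++ [x]) = d then sgn (S ++ [x]) else 0) = _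
      rw [gcdM_append, sgn_append])]
    rw [sum_if_neg]
    ring
  refine ⟨fun d => ?_, ?_, fun S hS => ?_⟩
  · show ((counts.items.foldl (fun (acc : PySem.Dict Int Int) p =>
        acc.insert (pyGcd p.1 x) (acc.getD (pyGcd p.1 x) 0 - p.2)) counts).insert (|x|)
        ((counts.items.foldl (fun (acc : PySem.Dict Int Int) p =>
          acc.insert (pyGcd p.1 x) (acc.getD (pyGcd p.1 x) 0 - p.2)) counts).getD (|x|) 0 + 1)).getD d 0
      = W (px ++ [x]) d
    rw [PySem.Dict.getD_insert]
    by_cases hd : d = |x|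
    · subst hd
      rw [if_pos rfl, dget_fold, hitems, hWx, hW, if_pos rfl]
      ring
    · rw [if_neg hd, dget_fold, hitems, hWx, hW, if_neg (fun e => hd e.symm)]
      ring
  · exact PySem.Dict.nodup_keys_insert _ _ _ (PySem.Dict.nodup_keys_foldl_insert_key _ _ _ _ hnd)
  · rw [PySem.Dict.mem_keys_insert]
    have hnw := PySem.Dict.keys_foldl_insert_key counts.items (fun p : Int × Int => pyGcd p.1 x)
      (fun acc p => acc.getD (pyGcd p.1 x) 0 - p.2) counts
    rw [nsubs_append] at hS
    rcases List.mem_append.mp hS with hS | hS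
    · right
      rw [hnw, PySem.Set.mem_update]
      left
      exact hkeys S hS
    · rcases List.mem_cons.mp hS with rfl | hS
      · left
        exact gcdM_single x
      · obtain ⟨T, hT, rfl⟩ := List.mem_map.mp hS
        right
        rw [hnw, PySem.Set.mem_update]
        right
        rw [gcdM_append, PySem.Dict.items_eq_map_keys counts hnd 0, List.map_map]
        exact List.mem_map_of_mem (hkeys T hT)

theorem B_eq_sigma (gens : List Int) : distinct_points_per_2pi_alt gens = sigmaSpec gens := by
  have hinv : ∀ l : List Int, DInv l (l.foldl (fun (counts : PySem.Dict Int Int) x =>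
      let nw := counts.items.foldl (fun (acc : PySem.Dict Int Int) p =>
        acc.insert (pyGcd p.1 x) (acc.getD (pyGcd p.1 x) 0 - p.2)) counts
      nw.insert (|x|) (nw.getD (|x|) 0 + 1)) PySem.Dict.empty) := by
    intro l
    induction l using List.reverseRecOn with
    | nil =>
      refine ⟨fun d => ?_, by rw [List.foldl_nil]; exact PySem.Dict.nodup_keys_empty, fun S hS => ?_⟩
      · rw [List.foldl_nil, PySem.Dict.getD_empty]
        unfold W
        rw [show nsubs [] = [] from rfl]
        rfl
      · rw [show nsubs [] = [] from rfl] at hS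
        simp at hS
    | append_singleton l x ih =>
      rw [List.foldl_append]
      exact dinv_step l x _ ih
  unfold distinct_points_per_2pi_alt
  dsimp only
  obtain ⟨hW, hnd, hkeys⟩ := hinv gens
  rw [PySem.List.foldl_add, zero_add]
  rw [PySem.Dict.items_eq_map_keys _ hnd 0, List.map_map]
  rw [show ((fun p : Int × Int => p.1 * p.2) ∘ fun k => (k, (gens.foldl (fun (counts : PySem.Dict Int Int) x =>
      let nw := counts.items.foldl (fun (acc : PySem.Dict Int Int) p =>
        acc.insert (pyGcd p.1 x) (acc.getD (pyGcd p.1 x) 0 - p.2)) counts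
      nw.insert (|x|) (nw.getD (|x|) 0 + 1)) PySem.Dict.empty).getD k 0))
      = fun k => ((nsubs gens).map (fun S => if gcd_many S = k then sgn S * gcd_many S else 0)).sum
      from funext (fun k => by
    dsimp only [Function.comp]
    rw [hW k]
    unfold W
    rw [← List.sum_map_mul_left]
    congr 1
    apply List.map_congr_left
    intro S _
    by_cases hg : gcd_many S = k
    · subst hg
      simp [mul_comm]
    · simp [hg])]
  rw [group_sum gcd_many _ (nsubs gens) _ hnd hkeys]
  unfold sigmaSpec
  rw [(subs_head_struct gens).1, List.map_cons, List.sum_cons]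
  rw [show sgn [] * gcd_many [] = 0 from by norm_num [gcd_many]]
  ring


-- ===== VERDICT (by name: the statement is the Claim_ definition above) =====
theorem distinct_points_per_2pi_spec : Claim_equal_distinct_points_per_2pi := by
  intro gens _
  unfold Spec_distinct_points_per_2pi
  rw [A_eq_sigma, B_eq_sigma]
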